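-- pv_equiv track=rewrite | github.com/saif-malik-01/taxo-gpt | apps/api/src/services/document/pipeline.py | _extract_upload_hints
-- ===== SOURCE A (Python) =====
-- from typing import AsyncGenerator, Dict, List, Optional, Tuple
--
-- def _extract_upload_hints(filename: str, user_message: str) -> List[str]:
--     hints = []
--     fname_lower = filename.lower()
--     msg_lower   = (user_message or "").lower()
--
--     if any(k in fname_lower for k in ("new_", "current_", "latest_", "received_")):
--         hints.append("filename:current")
--     if any(k in fname_lower for k in ("old_", "prev_", "earlier_", "prior_", "hist_")):
--         hints.append("filename:historical")
--     if any(k in fname_lower for k in ("reply_", "response_", "my_reply", "draft_")):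
--         hints.append("filename:reply")
--     if any(k in fname_lower for k in ("judgment_", "order_", "hc_", "sc_", "tribunal_")):
--         hints.append("filename:reference")
--     if any(k in fname_lower for k in ("circular_", "notif_", "notification_")):
--         hints.append("filename:reference")
--
--     if any(k in msg_lower for k in ("just received", "current notice", "new notice", "latest notice", "received today", "got today")):
--         hints.append("msg:current_notice")
--     if any(k in msg_lower for k in ("old notice", "previous notice", "earlier notice", "old case", "prior notice", "already replied")):
--         hints.append("msg:historical_notice")
--     if any(k in msg_lower for k in ("my reply", "my draft", "i prepared", "draft reply", "prepared by me")):
--         hints.append("msg:user_draft")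
--     if any(k in msg_lower for k in ("for reference", "reference document", "judgment", "circular", "for context")):
--         hints.append("msg:reference")
--     if any(k in msg_lower for k in ("defend", "defensive", "protection", "protect")):
--         hints.append("msg:defensive")
--     if any(k in msg_lower for k in ("in favour", "in favor", "department side", "revenue side")):
--         hints.append("msg:in_favour")
--     if any(k in msg_lower for k in ("different case", "new case", "other matter", "different client", "another notice")):
--         hints.append("msg:new_case")
--
--     return hints
-- ===== SOURCE B (Python) =====
-- from typing import List
--
-- _FNAME_RULES = [
--     (("new_", "current_", "latest_", "received_"), "filename:current"),
--     (("old_", "prev_", "earlier_", "prior_", "hist_"), "filename:historical"),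
--     (("reply_", "response_", "my_reply", "draft_"), "filename:reply"),
--     (("judgment_", "order_", "hc_", "sc_", "tribunal_"), "filename:reference"),
--     (("circular_", "notif_", "notification_"), "filename:reference"),
-- ]
--
-- _MSG_RULES = [
--     (("just received", "current notice", "new notice", "latest notice", "received today", "got today"), "msg:current_notice"),
--     (("old notice", "previous notice", "earlier notice", "old case", "prior notice", "already replied"), "msg:historical_notice"),
--     (("my reply", "my draft", "i prepared", "draft reply", "prepared by me"), "msg:user_draft"),
--     (("for reference", "reference document", "judgment", "circular", "for context"), "msg:reference"),
--     (("defend", "defensive", "protection", "protect"), "msg:defensive"),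
--     (("in favour", "in favor", "department side", "revenue side"), "msg:in_favour"),
--     (("different case", "new case", "other matter", "different client", "another notice"), "msg:new_case"),
-- ]
--
--
-- def _scan(text, rules):
--     # Text-driven multi-pattern matching: walk the positions of `text` once,
--     # recording every keyword that starts at each position, then emit each
--     # rule's label (in rule order) if any of its keywords was found.
--     # Correct because for a nonempty keyword k, `k in text` holds iff
--     # text.startswith(k, i) for some 0 <= i < len(text).
--     keywords = [k for kws, _ in rules for k in kws]
--     found = set()
--     for i in range(len(text)):
--         for k in keywords:
--             if text.startswith(k, i):
--                 found.add(k)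
--     return [label for kws, label in rules if any(k in found for k in kws)]
--
--
-- def _extract_upload_hints(filename: str, user_message: str) -> List[str]:
--     return (_scan(filename.lower(), _FNAME_RULES)
--             + _scan((user_message or "").lower(), _MSG_RULES))
-- ===== Notes on version B (the rewrite author's own statement) =====
-- stated objective: alternative
-- what changed: Replaced A's twelve independent any(k in s) substring tests by a text-driven multi-pattern scan: one pass over the positions of each lowercased string collects the set of keywords that start at some position, and labels are then emitted for rules whose keyword set intersects the found set.
import Mathlib
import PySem

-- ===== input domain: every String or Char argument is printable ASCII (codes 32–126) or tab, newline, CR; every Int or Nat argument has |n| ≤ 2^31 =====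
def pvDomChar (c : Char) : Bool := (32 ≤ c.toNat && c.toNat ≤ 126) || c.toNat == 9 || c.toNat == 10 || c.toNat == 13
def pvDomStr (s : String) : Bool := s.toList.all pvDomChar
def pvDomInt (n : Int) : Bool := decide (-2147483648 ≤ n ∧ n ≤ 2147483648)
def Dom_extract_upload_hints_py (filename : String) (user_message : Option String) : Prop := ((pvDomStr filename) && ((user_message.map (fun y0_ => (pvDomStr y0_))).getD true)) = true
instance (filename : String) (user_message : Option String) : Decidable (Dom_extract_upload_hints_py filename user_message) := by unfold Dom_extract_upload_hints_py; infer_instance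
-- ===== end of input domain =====

-- B replaces A's twelve any(k in s) substring tests by a text-driven scan that walks each
-- lowercased string's positions once, collecting the set of keywords found (objective: alternative).

-- ===== PORT A =====
-- literal transliteration: hints accumulator, 12 sequential `if any(...)` appends
def extract_upload_hints_py (filename : String) (user_message : Option String) : List String :=
  let hints : List String := []
  let fname_lower := PySem.Str.lower filename
  let msg_lower := PySem.Str.lower (user_message.getD "")   -- (user_message or ""): None → ""; an empty string is falsy and also yields ""
  let hints := if ["new_", "current_", "latest_", "received_"].any (fun k => PySem.Str.isIn k fname_lower) then hints ++ ["filename:current"] else hints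
  let hints := if ["old_", "prev_", "earlier_", "prior_", "hist_"].any (fun k => PySem.Str.isIn k fname_lower) then hints ++ ["filename:historical"] else hints
  let hints := if ["reply_", "response_", "my_reply", "draft_"].any (fun k => PySem.Str.isIn k fname_lower) then hints ++ ["filename:reply"] else hints
  let hints := if ["judgment_", "order_", "hc_", "sc_", "tribunal_"].any (fun k => PySem.Str.isIn k fname_lower) then hints ++ ["filename:reference"] else hints
  let hints := if ["circular_", "notif_", "notification_"].any (fun k => PySem.Str.isIn k fname_lower) then hints ++ ["filename:reference"] else hints
  let hints := if ["just received", "current notice", "new notice", "latest notice", "received today", "got today"].any (fun k => PySem.Str.isIn k msg_lower) then hints ++ ["msg:current_notice"] else hints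
  let hints := if ["old notice", "previous notice", "earlier notice", "old case", "prior notice", "already replied"].any (fun k => PySem.Str.isIn k msg_lower) then hints ++ ["msg:historical_notice"] else hints
  let hints := if ["my reply", "my draft", "i prepared", "draft reply", "prepared by me"].any (fun k => PySem.Str.isIn k msg_lower) then hints ++ ["msg:user_draft"] else hints
  let hints := if ["for reference", "reference document", "judgment", "circular", "for context"].any (fun k => PySem.Str.isIn k msg_lower) then hints ++ ["msg:reference"] else hints
  let hints := if ["defend", "defensive", "protection", "protect"].any (fun k => PySem.Str.isIn k msg_lower) then hints ++ ["msg:defensive"] else hints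
  let hints := if ["in favour", "in favor", "department side", "revenue side"].any (fun k => PySem.Str.isIn k msg_lower) then hints ++ ["msg:in_favour"] else hints
  let hints := if ["different case", "new case", "other matter", "different client", "another notice"].any (fun k => PySem.Str.isIn k msg_lower) then hints ++ ["msg:new_case"] else hints
  hints

-- ===== PORT B =====
-- the two rule tables from Source B: (keywords, label)
def pvFnameRules : List (List String × String) :=
  [ (["new_", "current_", "latest_", "received_"], "filename:current"),
    (["old_", "prev_", "earlier_", "prior_", "hist_"], "filename:historical"),
    (["reply_", "response_", "my_reply", "draft_"], "filename:reply"),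
    (["judgment_", "order_", "hc_", "sc_", "tribunal_"], "filename:reference"),
    (["circular_", "notif_", "notification_"], "filename:reference") ]

def pvMsgRules : List (List String × String) :=
  [ (["just received", "current notice", "new notice", "latest notice", "received today", "got today"], "msg:current_notice"),
    (["old notice", "previous notice", "earlier notice", "old case", "prior notice", "already replied"], "msg:historical_notice"),
    (["my reply", "my draft", "i prepared", "draft reply", "prepared by me"], "msg:user_draft"),
    (["for reference", "reference document", "judgment", "circular", "for context"], "msg:reference"),
    (["defend", "defensive", "protection", "protect"], "msg:defensive"),
    (["in favour", "in favor", "department side", "revenue side"], "msg:in_favour"),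
    (["different case", "new case", "other matter", "different client", "another notice"], "msg:new_case") ]

-- _scan from Source B: walk range(len(text)); text.startswith(k, i) with 0 ≤ i is exactly
-- k.toList.isPrefixOf (text.toList.drop i) (ported by hand, exact on that index range);
-- `found` is a Python set built with set.add → PySem.Set.
def pvScan (text : String) (rules : List (List String × String)) : List String :=
  let keywords := rules.flatMap (fun r => r.1)
  let t := text.toList
  let found : PySem.Set String := (List.range t.length).foldl
    (fun fnd i => keywords.foldl
      (fun fnd k => if k.toList.isPrefixOf (t.drop i) then PySem.Set.add fnd k else fnd) fnd)
    PySem.Set.empty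
  (rules.filter (fun r => r.1.any (fun k => found.contains k))).map (fun r => r.2)

def extract_upload_hints_py_alt (filename : String) (user_message : Option String) : List String :=
  pvScan (PySem.Str.lower filename) pvFnameRules
    ++ pvScan (PySem.Str.lower (user_message.getD "")) pvMsgRules

-- ===== PRECONDITION & SPEC =====
def Spec_extract_upload_hints_py (filename : String) (user_message : Option String) (out : List String) : Prop := out = extract_upload_hints_py_alt filename user_message
instance (filename : String) (user_message : Option String) (out : List String) : Decidable (Spec_extract_upload_hints_py filename user_message out) := by unfold Spec_extract_upload_hints_py; infer_instance

-- ===== CLAIM (what is proved, stated in full; the proofs are below) =====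
def Claim_equal_extract_upload_hints_py : Prop := ∀ (filename : String) (user_message : Option String), Dom_extract_upload_hints_py filename user_message → Spec_extract_upload_hints_py filename user_message (extract_upload_hints_py filename user_message)

-- ===== LEMMAS AND PROOFS =====

-- membership after the inner keyword loop at one position
theorem pv_mem_inner (t : List Char) (kws : List String) (i : Nat) (f : PySem.Set String) (x : String) :
    x ∈ kws.foldl (fun fnd k => if k.toList.isPrefixOf (t.drop i) then PySem.Set.add fnd k else fnd) f ↔
      x ∈ f ∨ (x ∈ kws ∧ x.toList.isPrefixOf (t.drop i) = true) := by
  induction kws generalizing f with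
  | nil => simp
  | cons k ks ih =>
    simp only [List.foldl_cons, ih]
    by_cases h : k.toList.isPrefixOf (t.drop i) = true
    · simp only [h, if_pos]
      rw [PySem.Set.mem_add]
      constructor
      · rintro ((hf | rfl) | hrest)
        · exact Or.inl hf
        · exact Or.inr ⟨List.mem_cons_self, h⟩
        · exact Or.inr ⟨List.mem_cons_of_mem _ hrest.1, hrest.2⟩
      · rintro (hf | ⟨hm, hp⟩)
        · exact Or.inl (Or.inl hf)
        · rcases List.mem_cons.mp hm with rfl | hm'
          · exact Or.inl (Or.inr rfl)
          · exact Or.inr ⟨hm', hp⟩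
    · simp only [h, if_neg, Bool.false_eq_true, not_false_iff]
      constructor
      · rintro (hf | hrest)
        · exact Or.inl hf
        · exact Or.inr ⟨List.mem_cons_of_mem _ hrest.1, hrest.2⟩
      · rintro (hf | ⟨hm, hp⟩)
        · exact Or.inl hf
        · rcases List.mem_cons.mp hm with rfl | hm'
          · exact absurd hp h
          · exact Or.inr ⟨hm', hp⟩

-- membership after the outer position loop
theorem pv_mem_found (t : List Char) (kws : List String) (is : List Nat) (f : PySem.Set String) (x : String) :
    x ∈ is.foldl
        (fun fnd i => kws.foldl
          (fun fnd k => if k.toList.isPrefixOf (t.drop i) then PySem.Set.add fnd k else fnd) fnd) f ↔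
      x ∈ f ∨ (x ∈ kws ∧ ∃ i ∈ is, x.toList.isPrefixOf (t.drop i) = true) := by
  induction is generalizing f with
  | nil => simp
  | cons j js ih =>
    simp only [List.foldl_cons, ih, pv_mem_inner, List.mem_cons]
    constructor
    · rintro ((hf | ⟨hm, hp⟩) | ⟨hm, i, hi, hp⟩)
      · exact Or.inl hf
      · exact Or.inr ⟨hm, j, Or.inl rfl, hp⟩
      · exact Or.inr ⟨hm, i, Or.inr hi, hp⟩
    · rintro (hf | ⟨hm, i, (rfl | hi), hp⟩)
      · exact Or.inl (Or.inl hf)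
      · exact Or.inl (Or.inr ⟨hm, hp⟩)
      · exact Or.inr ⟨hm, i, hi, hp⟩

-- any over a list with pointwise-equal predicates on its members
theorem pv_any_congr_mem {α : Type} (l : List α) (p q : α → Bool) (h : ∀ a ∈ l, p a = q a) :
    l.any p = l.any q := by
  induction l with
  | nil => rfl
  | cons a as ih => simp [h a (List.mem_cons_self), ih fun b hb => h b (List.mem_cons_of_mem _ hb)]

-- a nonempty keyword of the table is in `found` exactly when it is a substring of the text
theorem pv_contains_found (text : String) (kws : List String) (x : String)
    (hx : x ∈ kws) (hne : x.toList ≠ []) :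
    (((List.range text.toList.length).foldl
        (fun fnd i => kws.foldl
          (fun fnd k => if k.toList.isPrefixOf (text.toList.drop i) then PySem.Set.add fnd k else fnd) fnd)
        (PySem.Set.empty : PySem.Set String)).contains x) = PySem.Str.isIn x text := by
  have hmem := pv_mem_found text.toList kws (List.range text.toList.length) PySem.Set.empty x
  have hiff : (∃ i ∈ List.range text.toList.length, x.toList.isPrefixOf (text.toList.drop i) = true) ↔
      PySem.Chars.isIn x.toList text.toList = true := by
    rw [← PySem.Chars.exists_prefix_drop_iff_isIn]
    constructor
    · rintro ⟨i, _, hp⟩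
      exact ⟨i, List.isPrefixOf_iff_prefix.mp hp⟩
    · rintro ⟨j, hp⟩
      by_cases hj : j < text.toList.length
      · exact ⟨j, List.mem_range.mpr hj, List.isPrefixOf_iff_prefix.mpr hp⟩
      · exfalso
        have hnil : text.toList.drop j = [] := List.drop_eq_nil_of_le (le_of_not_gt hj)
        rw [hnil] at hp
        exact hne (List.prefix_nil.mp hp)
  have hstr : PySem.Str.isIn x text = PySem.Chars.isIn x.toList text.toList := by
    simp [PySem.Str.isIn]
  rw [hstr, Bool.eq_iff_iff]
  constructor
  · intro hc
    have hx' := (by simpa [PySem.Set.contains] using hc :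
      x ∈ (List.range text.toList.length).foldl
        (fun fnd i => kws.foldl
          (fun fnd k => if k.toList.isPrefixOf (text.toList.drop i) then PySem.Set.add fnd k else fnd) fnd)
        (PySem.Set.empty : PySem.Set String))
    rcases hmem.mp hx' with hf | ⟨_, hex⟩
    · simp [PySem.Set.empty] at hf
    · exact hiff.mp hex
  · intro h
    have hx' := hmem.mpr (Or.inr ⟨hx, hiff.mpr h⟩)
    simpa [PySem.Set.contains] using hx'

-- pvScan computes the per-rule any-substring filter (for tables of nonempty keywords)
theorem pv_scan_eq (text : String) (rules : List (List String × String))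
    (h : ∀ r ∈ rules, ∀ k ∈ r.1, k.toList ≠ []) :
    pvScan text rules =
      (rules.filter (fun r => r.1.any (fun k => PySem.Str.isIn k text))).map (fun r => r.2) := by
  simp only [pvScan]
  congr 1
  apply List.filter_congr
  intro r hr
  apply pv_any_congr_mem
  intro k hk
  exact pv_contains_found text (rules.flatMap (fun r => r.1)) k
    (List.mem_flatMap.mpr ⟨r, hr, hk⟩) (h r hr k hk)

-- appending under an if = concatenating an if-block (normalizes A's accumulator chain)
theorem pv_if_append (c : Prop) [Decidable c] (acc l : List String) :
    (if c then acc ++ l else acc) = acc ++ (if c then l else []) := by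
  split <;> simp

-- one step of B's filter-then-map = the corresponding if-block
theorem pv_filtermap_cons (p : List String × String → Bool)
    (f : List String × String → String)
    (r : List String × String) (rs : List (List String × String)) :
    ((r :: rs).filter p).map f = (if p r = true then [f r] else []) ++ (rs.filter p).map f := by
  by_cases h : p r = true <;> simp [h]

-- ===== VERDICT (by name: the statement is the Claim_ definition above) =====
theorem extract_upload_hints_py_spec : Claim_equal_extract_upload_hints_py := by
  intro filename user_message _
  unfold Spec_extract_upload_hints_py extract_upload_hints_py extract_upload_hints_py_alt
  rw [pv_scan_eq _ _ (by decide), pv_scan_eq _ _ (by decide)]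
  unfold pvFnameRules pvMsgRules
  simp only [pv_filtermap_cons, List.filter_nil, List.map_nil, pv_if_append]
  simp only [List.append_assoc, List.nil_append, List.append_nil]
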